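-- pv_equiv track=rewrite | github.com/Programming-Sai/daily-solves | Coding-Upsolve/E_I_love_username.py | check
-- ===== SOURCE A (Python) =====
-- def check(p):
--     max_point=p[0]
--     min_point=p[0]
--     res = 0
--     for i in range(1, len(p)):
--         if p[i] > max_point:
--             res+=1
--             max_point = p[i]
--         elif p[i] < min_point:
--             res+=1
--             min_point = p[i]
--     return res
-- ===== SOURCE B (Python) =====
-- def check(p):
--     pm = []
--     qm = []
--     for x in p:
--         pm.append(x if not pm or x > pm[-1] else pm[-1])
--         qm.append(x if not qm or x < qm[-1] else qm[-1])
--     return (sum(1 for a, b in zip(pm[1:], pm) if a > b)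
--             + sum(1 for a, b in zip(qm[1:], qm) if a < b))
-- ===== Notes on version B (the rewrite author's own statement) =====
-- stated objective: alternative
-- what changed: Replaces A's single pass with two mutable running extrema by a two-pass tabulation: build the prefix-maxima and prefix-minima tables, then count adjacent strict increases of the max table plus adjacent strict decreases of the min table (the two events are mutually exclusive, so the sum equals A's elif-count).
import Mathlib
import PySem

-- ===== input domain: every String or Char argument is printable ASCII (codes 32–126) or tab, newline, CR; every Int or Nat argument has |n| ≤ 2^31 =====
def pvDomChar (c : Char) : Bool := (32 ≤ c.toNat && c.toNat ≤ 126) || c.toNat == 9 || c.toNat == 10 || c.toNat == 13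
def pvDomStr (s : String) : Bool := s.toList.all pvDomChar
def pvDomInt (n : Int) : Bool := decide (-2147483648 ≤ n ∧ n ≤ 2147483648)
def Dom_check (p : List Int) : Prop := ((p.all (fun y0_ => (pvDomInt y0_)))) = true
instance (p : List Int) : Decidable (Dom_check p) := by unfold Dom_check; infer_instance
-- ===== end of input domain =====

-- B replaces A's one-pass mutable-extrema scan by a two-pass prefix-max/min tabulation
-- with a separate adjacent-pair counting pass (alternative decomposition, same cost).

-- ===== PORT A =====
-- A raises IndexError on the empty list (excluded by Pre_check; the nil branch here is dead under Pre_).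
-- Loop body of A (the if/elif/else over the running (max, min, res) state).
def pvStepA (st : Int × Int × Int) (pi : Int) : Int × Int × Int :=
  if pi > st.1 then (pi, st.2.1, st.2.2 + 1)
  else if pi < st.2.1 then (st.1, pi, st.2.2 + 1)
  else st

def check (p : List Int) : Int :=
  match p with
  | [] => 0
  | x :: _ =>
    ((PySem.List.pyRange 1 (p.length : Int) 1).foldl
      (fun st i => pvStepA st (PySem.List.pyGetD p i 0))   -- p[i]; i always in range here
      (x, x, (0 : Int))).2.2

-- ===== PORT B =====
-- 'x if not pm or x > pm[-1] else pm[-1]' : pm[-1] on nonempty pm is its last element (getLast?).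
def pvStepMax (acc : List Int) (x : Int) : List Int :=
  acc ++ [match acc.getLast? with | none => x | some l => if x > l then x else l]

def pvStepMin (acc : List Int) (x : Int) : List Int :=
  acc ++ [match acc.getLast? with | none => x | some l => if x < l then x else l]

-- pm[1:] is List.drop 1 (nonnegative slice); zip/sum of the generators are folds.
def check_alt (p : List Int) : Int :=
  let pm := p.foldl pvStepMax []
  let qm := p.foldl pvStepMin []
  ((pm.drop 1).zip pm).foldl (fun (r : Int) ab => if ab.1 > ab.2 then r + 1 else r) 0
  + ((qm.drop 1).zip qm).foldl (fun (r : Int) ab => if ab.1 < ab.2 then r + 1 else r) 0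

-- ===== PRECONDITION & SPEC =====
-- A reads the first element before the loop, so it raises IndexError exactly on the empty list.
def Pre_check (p : List Int) : Prop := p ≠ []
instance (p : List Int) : Decidable (Pre_check p) := by unfold Pre_check; infer_instance
def pvWitness_check : List Int := [3, 1, 4, 1, 5]

def Spec_check (p : List Int) (out : Int) : Prop := out = check_alt p
instance (p : List Int) (out : Int) : Decidable (Spec_check p out) := by unfold Spec_check; infer_instance

-- ===== CLAIM (what is proved, stated in full; the proofs are below) =====
def Claim_equal_check : Prop := ∀ (p : List Int), Dom_check p → Pre_check p → Spec_check p (check p)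

-- ===== LEMMAS AND PROOFS =====

-- Reference recursion: A's loop body on the tail, with running max/min.
def pvRecA (mx mn : Int) : List Int → Int
  | [] => 0
  | y :: ys =>
    if y > mx then 1 + pvRecA y mn ys
    else if y < mn then 1 + pvRecA mx y ys
    else pvRecA mx mn ys

-- Prefix-max tail list: entries of pm after the first, given current max m.
def pvPmList (m : Int) : List Int → List Int
  | [] => []
  | y :: ys => (if y > m then y else m) :: pvPmList (if y > m then y else m) ys

def pvQmList (m : Int) : List Int → List Int
  | [] => []
  | y :: ys => (if y < m then y else m) :: pvQmList (if y < m then y else m) ys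

-- Strict-increase count along consecutive pairs, previous value m.
def pvCntGT (m : Int) : List Int → Int
  | [] => 0
  | y :: ys => (if y > m then 1 else 0) + pvCntGT y ys

def pvCntLT (m : Int) : List Int → Int
  | [] => 0
  | y :: ys => (if y < m then 1 else 0) + pvCntLT y ys

theorem pvFoldA (xs : List Int) : ∀ (mx mn r : Int),
    (xs.foldl pvStepA (mx, mn, r)).2.2 = r + pvRecA mx mn xs := by
  induction xs with
  | nil => intro mx mn r; simp [pvRecA]
  | cons y ys ih =>
    intro mx mn r
    simp only [List.foldl_cons, pvRecA, pvStepA]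
    by_cases h1 : y > mx
    · simp [h1, ih]; ring
    · by_cases h2 : y < mn
      · simp [h1, h2, ih]; ring
      · simp [h1, h2, ih]

theorem pvCheckEq (x : Int) (xs : List Int) : check (x :: xs) = pvRecA x x xs := by
  show ((PySem.List.pyRange 1 ((x :: xs).length : Int) 1).foldl
      (fun st i => pvStepA st (PySem.List.pyGetD (x :: xs) i 0)) (x, x, (0:Int))).2.2 = _
  rw [PySem.List.foldl_pyRange_pyGetD' (xs := x :: xs) (f := pvStepA) (d := 0)
      (init := (x, x, (0:Int))) (a := 1) (by norm_num)]
  simp [pvFoldA]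

theorem pvFoldPm (xs : List Int) : ∀ (acc : List Int) (m : Int),
    xs.foldl pvStepMax (acc ++ [m]) = (acc ++ [m]) ++ pvPmList m xs := by
  induction xs with
  | nil => intro acc m; simp [pvPmList]
  | cons y ys ih =>
    intro acc m
    simp only [List.foldl_cons, pvPmList]
    have hstep : pvStepMax (acc ++ [m]) y = (acc ++ [m]) ++ [if y > m then y else m] := by
      simp [pvStepMax]
    rw [hstep, ih (acc ++ [m]) (if y > m then y else m)]
    simp

theorem pvFoldQm (xs : List Int) : ∀ (acc : List Int) (m : Int),
    xs.foldl pvStepMin (acc ++ [m]) = (acc ++ [m]) ++ pvQmList m xs := by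
  induction xs with
  | nil => intro acc m; simp [pvQmList]
  | cons y ys ih =>
    intro acc m
    simp only [List.foldl_cons, pvQmList]
    have hstep : pvStepMin (acc ++ [m]) y = (acc ++ [m]) ++ [if y < m then y else m] := by
      simp [pvStepMin]
    rw [hstep, ih (acc ++ [m]) (if y < m then y else m)]
    simp

theorem pvFoldCntGT (L : List Int) : ∀ (m : Int) (r : Int),
    ((L.zip (m :: L)).foldl (fun (r : Int) ab => if ab.1 > ab.2 then r + 1 else r) r)
      = r + pvCntGT m L := by
  induction L with
  | nil => intro m r; simp [pvCntGT]
  | cons y ys ih =>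
    intro m r
    simp only [List.zip_cons_cons, List.foldl_cons, pvCntGT]
    by_cases h : y > m
    · simp [h, ih]; ring
    · simp [h, ih]

theorem pvFoldCntLT (L : List Int) : ∀ (m : Int) (r : Int),
    ((L.zip (m :: L)).foldl (fun (r : Int) ab => if ab.1 < ab.2 then r + 1 else r) r)
      = r + pvCntLT m L := by
  induction L with
  | nil => intro m r; simp [pvCntLT]
  | cons y ys ih =>
    intro m r
    simp only [List.zip_cons_cons, List.foldl_cons, pvCntLT]
    by_cases h : y < m
    · simp [h, ih]; ring
    · simp [h, ih]

theorem pvMain (xs : List Int) : ∀ (mx mn : Int), mn ≤ mx →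
    pvCntGT mx (pvPmList mx xs) + pvCntLT mn (pvQmList mn xs) = pvRecA mx mn xs := by
  induction xs with
  | nil => intro mx mn _; simp [pvPmList, pvQmList, pvCntGT, pvCntLT, pvRecA]
  | cons y ys ih =>
    intro mx mn h
    simp only [pvPmList, pvQmList, pvCntGT, pvCntLT, pvRecA]
    by_cases h1 : y > mx
    · have h2 : ¬ y < mn := by omega
      simp only [if_pos h1, if_neg h2, lt_irrefl, if_false]
      rw [← ih y mn (by omega)]
      ring
    · by_cases h2 : y < mn
      · simp only [if_neg h1, if_pos h2, lt_irrefl, gt_iff_lt, if_false]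
        rw [← ih mx y (by omega)]
        ring
      · simp only [if_neg h1, if_neg h2, lt_irrefl, gt_iff_lt, if_false]
        rw [← ih mx mn h]
        ring

theorem pvAltEq (x : Int) (xs : List Int) : check_alt (x :: xs) = pvRecA x x xs := by
  have hpm : (x :: xs).foldl pvStepMax [] = x :: pvPmList x xs := by
    have : pvStepMax [] x = [] ++ [x] := by simp [pvStepMax]
    simp only [List.foldl_cons, this]
    rw [pvFoldPm xs [] x]; simp
  have hqm : (x :: xs).foldl pvStepMin [] = x :: pvQmList x xs := by
    have : pvStepMin [] x = [] ++ [x] := by simp [pvStepMin]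
    simp only [List.foldl_cons, this]
    rw [pvFoldQm xs [] x]; simp
  simp only [check_alt, hpm, hqm, List.drop_succ_cons, List.drop_zero]
  rw [pvFoldCntGT, pvFoldCntLT, zero_add, zero_add]
  exact pvMain xs x x le_rfl

-- ===== VERDICT (by name: the statement is the Claim_ definition above) =====
theorem check_spec : Claim_equal_check := by
  intro p _ hpre
  match p with
  | [] => exact absurd rfl hpre
  | x :: xs =>
    show check (x :: xs) = check_alt (x :: xs)
    rw [pvCheckEq, pvAltEq]
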